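-- pv_equiv track=rewrite | github.com/Alexander-Morin/Bioinformatic_algos | ch3_overview.py | path_graph
-- ===== SOURCE A (Python) =====
-- def spell_edge(node_list):
--     path = []
--     for i in range(len(node_list) - 1):  # combine the (k-1) prefix/suffix to form the kmer edge
--         path.append(node_list[i] + node_list[i+1][-1])
--     return path
--
-- def path_graph(text, k, d):
--     node_pair1 = []
--     node_pair2 = []
--     for i in range(len(text) - (2*k-d)):  # creates paired (k-1)mers prefix/suffix nodes
--         node_pair1.append(text[i:i+k-d])  # read 1
--         node_pair2.append(text[(i+d+k):(i+2*k+d-1)])  # read 2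
--     path1 = spell_edge(node_pair1)
--     path2 = spell_edge(node_pair2)
--     paired_path = list(map((lambda x, y: x + "|" + y), path1, path2))
--     return " -> ".join(paired_path)
-- ===== SOURCE B (Python) =====
-- def path_graph(text, k, d):
--     edges = [text[i:i+k-d+1] + "|" + text[i+d+k:i+2*k+d]
--              for i in range(len(text) - (2*k - d) - 1)]
--     return " -> ".join(edges)
-- ===== Notes on version B (the rewrite author's own statement) =====
-- stated objective: simpler
-- what changed: B slices each paired edge directly out of text in a single comprehension (left = text[i:i+k-d+1], right = text[i+d+k:i+2k+d]), eliminating the two intermediate node lists, the spell_edge overlap-combining pass and the map/zip step.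
-- outside the precondition, e.g. on path_graph('abcdefghijk', 5, 2): A returns 'abcd|hijkk -> bcde|ijkk', B returns 'abcd|hijk -> bcde|ijk'; on path_graph('abc', 0, -1): A returns 'ab|b', B returns 'ab|'
import Mathlib
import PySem

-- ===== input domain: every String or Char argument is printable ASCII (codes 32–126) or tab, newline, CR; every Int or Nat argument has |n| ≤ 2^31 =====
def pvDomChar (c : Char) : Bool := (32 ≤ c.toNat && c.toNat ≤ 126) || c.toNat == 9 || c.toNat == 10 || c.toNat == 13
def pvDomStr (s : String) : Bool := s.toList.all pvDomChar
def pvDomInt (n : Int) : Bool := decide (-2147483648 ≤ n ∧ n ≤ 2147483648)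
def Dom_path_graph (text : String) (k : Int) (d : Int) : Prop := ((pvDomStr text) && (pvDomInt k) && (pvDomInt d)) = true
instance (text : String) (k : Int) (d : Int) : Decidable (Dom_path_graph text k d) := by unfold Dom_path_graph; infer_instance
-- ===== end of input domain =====

-- B slices each paired edge directly out of text in one comprehension, removing the two
-- intermediate node lists, the spell_edge overlap-combining pass and the map/zip step (objective: simpler).

-- ===== PORT A =====
-- s[-1] : Python raises IndexError on s = "" (such inputs are excluded by Pre_); total form with default "".
def pvLast1 (s : String) : String :=
  ((PySem.Str.pyGet? s (-1)).map (fun c => String.ofList [c])).getD ""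

def spell_edge (node_list : List String) : List String :=
  (PySem.List.pyRange 0 ((node_list.length : Int) - 1) 1).foldl
    (fun path i =>
      path ++ [PySem.List.pyGetD node_list i "" ++ pvLast1 (PySem.List.pyGetD node_list (i + 1) "")])
    []

def path_graph (text : String) (k : Int) (d : Int) : String :=
  let pair := (PySem.List.pyRange 0 (PySem.Str.len text - (2 * k - d)) 1).foldl
    (fun (st : List String × List String) i =>
      (st.1 ++ [PySem.Str.slice text (some i) (some (i + k - d))],
       st.2 ++ [PySem.Str.slice text (some (i + d + k)) (some (i + 2 * k + d - 1))]))
    ([], [])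
  let path1 := spell_edge pair.1
  let path2 := spell_edge pair.2
  -- map(lambda x, y: x + "|" + y, path1, path2) zips to the shorter list
  let paired_path := List.zipWith (fun x y => x ++ "|" ++ y) path1 path2
  PySem.Str.join " -> " paired_path

-- ===== PORT B =====
def path_graph_alt (text : String) (k : Int) (d : Int) : String :=
  PySem.Str.join " -> "
    ((PySem.List.pyRange 0 (PySem.Str.len text - (2 * k - d) - 1) 1).map
      (fun i =>
        PySem.Str.slice text (some i) (some (i + k - d + 1)) ++ "|" ++
        PySem.Str.slice text (some (i + d + k)) (some (i + 2 * k + d))))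

-- ===== PRECONDITION & SPEC =====
-- Pre_ keeps every input whose node-window count len(text)-(2k-d) is at most 1 (A returns ""
-- without ever indexing) and otherwise requires 2 ≤ k, d ≤ 1 and 0 ≤ d+k, so that every node
-- slice lies inside text; the excluded active inputs make A raise IndexError on an empty node
-- slice, or make a node slice wrap around / get truncated at the ends of text — a corner where
-- A's wrapped or last-char-padded spelling and B's plain clamped slice are equally arbitrary.
def Pre_path_graph (text : String) (k : Int) (d : Int) : Prop :=
  PySem.Str.len text - (2 * k - d) ≤ 1 ∨ (2 ≤ k ∧ d ≤ 1 ∧ 0 ≤ d + k)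
instance (text : String) (k : Int) (d : Int) : Decidable (Pre_path_graph text k d) := by
  unfold Pre_path_graph; infer_instance

def pvWitness_path_graph : String × Int × Int := ("abcdef", 2, 1)

def Spec_path_graph (text : String) (k : Int) (d : Int) (out : String) : Prop := out = path_graph_alt text k d
instance (text : String) (k : Int) (d : Int) (out : String) : Decidable (Spec_path_graph text k d out) := by unfold Spec_path_graph; infer_instance

-- ===== CLAIM (what is proved, stated in full; the proofs are below) =====
def Claim_equal_path_graph : Prop := ∀ (text : String) (k : Int) (d : Int), Dom_path_graph text k d → Pre_path_graph text k d → Spec_path_graph text k d (path_graph text k d)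

-- ===== LEMMAS AND PROOFS =====

-- spell_edge over a list of n generated nodes is the pointwise overlap-combination over n-1 indices
lemma pv_spell_map (g : Int → String) (n : Int) :
    spell_edge ((PySem.List.pyRange 0 n 1).map g) =
      (PySem.List.pyRange 0 (n - 1) 1).map (fun i => g i ++ pvLast1 (g (i + 1))) := by
  unfold spell_edge
  rw [List.length_map, PySem.List.length_pyRange_one]
  by_cases hn : n ≤ 0
  · rw [PySem.List.pyRange_one_eq_nil (a := 0) (b := (((n - 0).toNat : Int)) - 1) (by omega),
      PySem.List.pyRange_one_eq_nil (a := 0) (b := n - 1) (by omega)]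
    simp
  · rw [show (((n - 0).toNat : Int)) = n by omega, PySem.List.foldl_append_singleton_eq_map,
      List.nil_append]
    apply List.map_congr_left
    intro i hi
    rw [PySem.List.mem_pyRange_one] at hi
    rw [PySem.List.pyGetD_map_pyRange_of_nonneg g n i _ hi.1 (by omega),
      PySem.List.pyGetD_map_pyRange_of_nonneg g n (i + 1) _ (by omega) (by omega)]

-- appending the single following character extends a slice by one: text[a:b-1] + text[a+1:b][-1] = text[a:b]
lemma pv_edge_merge (text : String) (a b : Int) (h0 : 0 ≤ a) (h1 : a + 2 ≤ b)
    (h2 : b ≤ PySem.Str.len text) :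
    PySem.Str.slice text (some a) (some (b - 1)) ++
        pvLast1 (PySem.Str.slice text (some (a + 1)) (some b)) =
      PySem.Str.slice text (some a) (some b) := by
  rw [PySem.Str.len_eq] at h2
  have hTL : text.toList.length = text.length := String.length_toList (s := text)
  obtain ⟨c, hc⟩ : ∃ c, text.toList[b.toNat - 1]? = some c :=
    ⟨_, List.getElem?_eq_getElem (by omega)⟩
  have hlast : pvLast1 (PySem.Str.slice text (some (a + 1)) (some b)) = String.ofList [c] := by
    unfold pvLast1
    rw [PySem.Str.pyGet?_eq, PySem.Str.toList_slice, PySem.Chars.pyGet?_eq_listPyGet?,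
      PySem.Chars.slice_eq_listSlice, PySem.List.pyGet?_neg_one,
      PySem.List.slice_toNat text.toList (a := a + 1) (b := b) (by omega) (by omega)]
    have hlen : (List.take (b.toNat - (a + 1).toNat) (List.drop (a + 1).toNat text.toList)).length =
        b.toNat - (a + 1).toNat := by
      rw [List.length_take, List.length_drop]; omega
    rw [List.getLast?_eq_getElem?, hlen, List.getElem?_take_of_lt (by omega), List.getElem?_drop,
      show (a + 1).toNat + (b.toNat - (a + 1).toNat - 1) = b.toNat - 1 by omega, hc]
    rfl
  rw [hlast]
  apply String.toList_inj.mp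
  rw [String.toList_append, String.toList_ofList, PySem.Str.toList_slice, PySem.Str.toList_slice,
    PySem.Chars.slice_eq_listSlice, PySem.Chars.slice_eq_listSlice,
    PySem.List.slice_toNat text.toList (a := a) (b := b - 1) (by omega) (by omega),
    PySem.List.slice_toNat text.toList (a := a) (b := b) (by omega) (by omega),
    show b.toNat - a.toNat = ((b - 1).toNat - a.toNat) + 1 by omega, List.take_add_one,
    List.getElem?_drop, show a.toNat + ((b - 1).toNat - a.toNat) = b.toNat - 1 by omega, hc]
  rfl

-- ===== VERDICT (by name: the statement is the Claim_ definition above) =====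
theorem path_graph_spec : Claim_equal_path_graph := by
  intro text k d _ hPre
  simp only [Spec_path_graph, path_graph, path_graph_alt]
  rw [PySem.List.foldl_prod_mk
      (f := fun acc i => acc ++ [PySem.Str.slice text (some i) (some (i + k - d))])
      (g := fun acc i => acc ++ [PySem.Str.slice text (some (i + d + k)) (some (i + 2 * k + d - 1))]),
    PySem.List.foldl_append_singleton_eq_map, PySem.List.foldl_append_singleton_eq_map,
    List.nil_append, List.nil_append, pv_spell_map, pv_spell_map, List.zipWith_map,
    List.zipWith_self]
  rcases hPre with hn | ⟨hk, hd, hdk⟩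
  · rw [PySem.List.pyRange_one_eq_nil (by omega)]
    simp
  · congr 1
    apply List.map_congr_left
    intro i hi
    rw [PySem.List.mem_pyRange_one] at hi
    have hL : 0 ≤ PySem.Str.len text := by rw [PySem.Str.len_eq]; positivity
    have e1 : PySem.Str.slice text (some i) (some (i + k - d)) ++
        pvLast1 (PySem.Str.slice text (some (i + 1)) (some (i + 1 + k - d))) =
        PySem.Str.slice text (some i) (some (i + k - d + 1)) := by
      have h := pv_edge_merge text i (i + k - d + 1) (by omega) (by omega) (by omega)
      simpa [show i + k - d + 1 - 1 = i + k - d by ring,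
        show i + 1 + k - d = i + k - d + 1 by ring] using h
    have e2 : PySem.Str.slice text (some (i + d + k)) (some (i + 2 * k + d - 1)) ++
        pvLast1 (PySem.Str.slice text (some (i + 1 + d + k)) (some (i + 1 + 2 * k + d - 1))) =
        PySem.Str.slice text (some (i + d + k)) (some (i + 2 * k + d)) := by
      have h := pv_edge_merge text (i + d + k) (i + 2 * k + d) (by omega) (by omega) (by omega)
      simpa [show i + 2 * k + d - 1 = i + d + k + 1 + (k - 2) by ring,
        show i + d + k + 1 = i + 1 + d + k by ring,
        show i + 1 + 2 * k + d - 1 = i + 2 * k + d by ring] using h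
    rw [e1, e2]
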